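-- pv_equiv track=rewrite | github.com/ConDar15/Portfolio | Python/Mathematical_Utilities.py | sub_fit
-- ===== SOURCE A (Python) =====
-- diff = lambda a : [a[i+1] - a[i] for i in range(len(a) - 1)]
--
-- def sub_fit(v, d):
--     """Used to recursively solve the fit function"""
--     c = [0 for n in range(d)]
--     if len(set(v)) == 1:
--         c[0] = v[0]
--     else:
--         t = sub_fit(diff(v), d - 1)
--         c = [c[0]] + [c[i] + t[i-1]//i for i in range(1,d)]
--     return c
-- ===== SOURCE B (Python) =====
-- def sub_fit(v, d):
--     """Used to recursively solve the fit function"""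
--     levels = []
--     while len(set(v)) != 1:
--         levels.append(d)
--         v = [v[i + 1] - v[i] for i in range(len(v) - 1)]
--         d -= 1
--     c = [0] * d
--     c[0] = v[0]
--     for dl in reversed(levels):
--         c = [0] + [c[i - 1] // i for i in range(1, dl)]
--     return c
-- ===== Notes on version B (the rewrite author's own statement) =====
-- stated objective: alternative
-- what changed: Replaced A's recursion with an explicit iterative two-phase computation: a descend loop that repeatedly takes finite differences while pushing each level's d onto a stack, then a fold back up that rebuilds the coefficient list from the constant base level.
import Mathlib
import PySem

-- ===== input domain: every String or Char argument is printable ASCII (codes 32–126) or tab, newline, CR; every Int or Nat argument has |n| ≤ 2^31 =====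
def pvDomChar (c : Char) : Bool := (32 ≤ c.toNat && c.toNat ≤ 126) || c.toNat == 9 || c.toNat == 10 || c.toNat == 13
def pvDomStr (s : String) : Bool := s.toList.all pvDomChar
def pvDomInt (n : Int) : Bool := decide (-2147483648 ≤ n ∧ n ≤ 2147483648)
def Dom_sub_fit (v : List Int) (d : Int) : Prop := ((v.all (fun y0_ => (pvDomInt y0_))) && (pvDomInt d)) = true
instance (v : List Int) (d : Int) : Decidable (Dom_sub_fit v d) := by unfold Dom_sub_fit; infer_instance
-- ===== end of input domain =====

-- B replaces A's recursion by an explicit iterative two-phase loop (descend pushing levels, then fold back up); objective: alternative decomposition.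

-- ===== PORT A =====
-- diff = lambda a : [a[i+1] - a[i] for i in range(len(a) - 1)]
def pyDiff (a : List Int) : List Int :=
  (PySem.List.pyRange 0 (PySem.List.len a - 1) 1).map
    (fun i => PySem.List.pyGetD a (i + 1) 0 - PySem.List.pyGetD a i 0)

-- Python's recursion is not structurally decreasing; `fuel = v.length` is a pure
-- termination guard (under Pre_ the base is reached within v.length levels; on fuel 0, outside Pre_, we return []).
def subFitAux : Nat → List Int → Int → List Int
  | 0, _, _ => []
  | fuel + 1, v, d =>
    let c : List Int := (List.range d.toNat).map (fun _ => 0)   -- [0 for n in range(d)]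
    if (PySem.Set.ofList v).length = 1 then
      c.set 0 (PySem.List.pyGetD v 0 0)                         -- c[0] = v[0]  (in range under Pre_)
    else
      let t := subFitAux fuel (pyDiff v) (d - 1)
      [PySem.List.pyGetD c 0 0] ++
        (PySem.List.pyRange 1 d 1).map
          (fun i => PySem.List.pyGetD c i 0 + PySem.Int.floordiv (PySem.List.pyGetD t (i - 1) 0) i)

def sub_fit (v : List Int) (d : Int) : List Int := subFitAux v.length v d

-- ===== PORT B =====
-- while len(set(v)) != 1: push d, v := [v[i+1]-v[i] ...] (inlined diff, as in Source B), d := d-1.  Fuel = length of the initial v (same guard as A's port).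
def descendB : Nat → List Int → Int → List Int → List Int × Int × List Int
  | 0, v, d, levels => (v, d, levels)
  | fuel + 1, v, d, levels =>
    if (PySem.Set.ofList v).length ≠ 1 then
      descendB fuel
        ((PySem.List.pyRange 0 (PySem.List.len v - 1) 1).map
          (fun i => PySem.List.pyGetD v (i + 1) 0 - PySem.List.pyGetD v i 0))
        (d - 1) (levels ++ [d])
    else (v, d, levels)

def upStepB (c : List Int) (dl : Int) : List Int :=
  [0] ++ (PySem.List.pyRange 1 dl 1).map
    (fun i => PySem.Int.floordiv (PySem.List.pyGetD c (i - 1) 0) i)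

def sub_fit_alt (v : List Int) (d : Int) : List Int :=
  let r := descendB v.length v d []
  let c0 := ((List.range r.2.1.toNat).map (fun _ => (0 : Int))).set 0 (PySem.List.pyGetD r.1 0 0)
  r.2.2.reverse.foldl upStepB c0

-- ===== PRECONDITION & SPEC =====
def pvIterDiff : Nat → List Int → List Int
  | 0, a => a
  | k + 1, a => pvIterDiff k (pyDiff a)

-- Exactly the inputs where Python's sub_fit returns: v nonempty (else infinite recursion → RecursionError)
-- and d exceeds the first level k at which the k-th finite difference of v is constant (else IndexError on c[0]).
def Pre_sub_fit (v : List Int) (d : Int) : Prop :=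
  v ≠ [] ∧ ∃ k < v.length, (k : Int) < d ∧ (PySem.Set.ofList (pvIterDiff k v)).length = 1
instance (v : List Int) (d : Int) : Decidable (Pre_sub_fit v d) := by unfold Pre_sub_fit; infer_instance

def pvWitness_sub_fit : List Int × Int := ([1, 3, 5], 2)

def Spec_sub_fit (v : List Int) (d : Int) (out : List Int) : Prop := out = sub_fit_alt v d
instance (v : List Int) (d : Int) (out : List Int) : Decidable (Spec_sub_fit v d out) := by unfold Spec_sub_fit; infer_instance

-- ===== CLAIM (what is proved, stated in full; the proofs are below) =====
def Claim_equal_sub_fit : Prop := ∀ (v : List Int) (d : Int), Dom_sub_fit v d → Pre_sub_fit v d → Spec_sub_fit v d (sub_fit v d)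

-- ===== LEMMAS AND PROOFS =====

theorem descendB_acc (fuel : Nat) (v : List Int) (d : Int) (levels : List Int) :
    descendB fuel v d levels =
      ((descendB fuel v d []).1, (descendB fuel v d []).2.1, levels ++ (descendB fuel v d []).2.2) := by
  induction fuel generalizing v d levels with
  | zero => simp [descendB]
  | succ f ih =>
    simp only [descendB, List.nil_append]
    split
    · rw [ih _ (d - 1) (levels ++ [d]), ih _ (d - 1) [d]]
      simp
    · simp

theorem zeros_pyGetD (n : Nat) (i : Int) :
    PySem.List.pyGetD ((List.range n).map (fun _ => (0 : Int))) i 0 = 0 := by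
  cases h : PySem.List.pyGet? ((List.range n).map (fun _ => (0 : Int))) i with
  | none => exact PySem.List.pyGetD_of_none _ _ _ h
  | some x =>
    have hx : x = 0 := by
      have hm := PySem.List.mem_of_pyGet?_eq_some _ h
      simp at hm
      exact hm.2
    simp only [PySem.List.pyGetD, h, hx, Option.getD_some]

theorem zeros_rep_pyGetD (n : Nat) (i : Int) :
    PySem.List.pyGetD (List.replicate n (0 : Int)) i 0 = 0 := by
  cases h : PySem.List.pyGet? (List.replicate n (0 : Int)) i with
  | none => exact PySem.List.pyGetD_of_none _ _ _ h
  | some x =>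
    have hx : x = 0 := List.eq_of_mem_replicate (PySem.List.mem_of_pyGet?_eq_some _ h)
    simp only [PySem.List.pyGetD, h, hx, Option.getD_some]

-- terminates within `fuel` diff-levels
def pvConstWithin : Nat → List Int → Prop
  | 0, _ => False
  | fuel + 1, v => (PySem.Set.ofList v).length = 1 ∨ pvConstWithin fuel (pyDiff v)

theorem length_pyDiff (v : List Int) : (pyDiff v).length = v.length - 1 := by
  simp [pyDiff, PySem.List.length_pyRange_one, PySem.List.len_eq]

theorem const_singleton (x : Int) : (PySem.Set.ofList [x]).length = 1 := by
  simp [PySem.Set.ofList, PySem.Set.add, PySem.Set.empty, PySem.Set.contains]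

theorem constWithin_of_ne_nil (v : List Int) (h : v ≠ []) : pvConstWithin v.length v := by
  generalize hn : v.length = n
  induction n generalizing v with
  | zero => exact absurd (List.length_eq_zero_iff.mp hn) h
  | succ m ih =>
    by_cases hc : (PySem.Set.ofList v).length = 1
    · exact Or.inl hc
    · refine Or.inr ?_
      have hm : m ≠ 0 := by
        rintro rfl
        obtain ⟨x, rfl⟩ := List.length_eq_one_iff.mp hn
        exact hc (const_singleton x)
      have hl : (pyDiff v).length = m := by rw [length_pyDiff, hn]; omega
      have hne : pyDiff v ≠ [] := by
        intro hnil; rw [hnil] at hl; simp at hl; omega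
      exact hl ▸ ih (pyDiff v) hne hl

-- main invariant: A's fuel recursion equals B's descend-then-fold two-phase computation
theorem main_eq (fuel : Nat) (v : List Int) (d : Int) (h : pvConstWithin fuel v) :
    subFitAux fuel v d =
      (descendB fuel v d []).2.2.reverse.foldl upStepB
        (((List.range (descendB fuel v d []).2.1.toNat).map (fun _ => (0 : Int))).set 0
          (PySem.List.pyGetD (descendB fuel v d []).1 0 0)) := by
  induction fuel generalizing v d with
  | zero => exact absurd h id
  | succ f ih =>
    by_cases hc : (PySem.Set.ofList v).length = 1
    · simp [subFitAux, descendB, hc]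
    · have hrec : pvConstWithin f (pyDiff v) := h.resolve_left hc
      simp only [subFitAux, descendB, hc, ne_eq, not_false_eq_true, if_true, if_neg, List.nil_append]
      rw [show (PySem.List.pyRange 0 (PySem.List.len v - 1) 1).map
            (fun i => PySem.List.pyGetD v (i + 1) 0 - PySem.List.pyGetD v i 0) = pyDiff v from rfl,
          descendB_acc f (pyDiff v) (d - 1) [d]]
      simp only [List.reverse_append, List.reverse_cons, List.reverse_nil, List.nil_append,
        List.foldl_append, List.foldl_cons, List.foldl_nil]
      rw [← ih (pyDiff v) (d - 1) hrec]
      simp only [upStepB]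
      congr 1
      · simp [zeros_rep_pyGetD]
      · apply List.map_congr_left
        intro i _
        rw [zeros_pyGetD]
        ring_nf

-- ===== VERDICT (by name: the statement is the Claim_ definition above) =====
theorem sub_fit_spec : Claim_equal_sub_fit := by
  intro v d _ hpre
  have hcw : pvConstWithin v.length v := constWithin_of_ne_nil v hpre.1
  show sub_fit v d = sub_fit_alt v d
  unfold sub_fit sub_fit_alt
  exact main_eq v.length v d hcw
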